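-- pv_equiv track=rewrite | github.com/macstock10/bevalc-intelligence | scripts/sync_permits.py | make_match_key
-- ===== SOURCE A (Python) =====
-- def normalize_name(s: str) -> str:
--     """Normalize company name for matching."""
--     if not s:
--         return ""
--     s = s.upper().strip()
--     # Remove common suffixes
--     for suffix in [' INC', ' INC.', ' LLC', ' L.L.C.', ' LTD', ' LTD.',
--                    ' CORP', ' CORP.', ' CO', ' CO.', ' COMPANY', ' LP', ' L.P.',
--                    ' CORPORATION', ' INCORPORATED', ' LIMITED']:
--         if s.endswith(suffix):
--             s = s[:-len(suffix)].strip()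
--     # Remove punctuation
--     s = ''.join(c for c in s if c.isalnum() or c == ' ')
--     s = ' '.join(s.split())
--     return s
--
-- def make_match_key(s: str) -> str:
--     """Create aggressive match key - removes common words."""
--     if not s:
--         return ""
--     s = normalize_name(s)
--     # Remove common words that vary between filings
--     for word in ['THE', 'AND', 'OF', 'WINE', 'WINES', 'WINERY', 'VINEYARD',
--                  'VINEYARDS', 'CELLARS', 'ESTATES', 'ESTATE', 'DISTILLERY',
--                  'DISTILLING', 'BREWING', 'BREWERY', 'IMPORTS', 'IMPORT',
--                  'INTERNATIONAL', 'INTL', 'USA', 'US', 'AMERICA', 'AMERICAN',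
--                  'GROUP', 'HOLDINGS', 'ENTERPRISES']:
--         s = ' '.join(w for w in s.split() if w != word)
--     return ' '.join(s.split())
-- ===== SOURCE B (Python) =====
-- STOPWORDS = set('THE AND OF WINE WINES WINERY VINEYARD VINEYARDS CELLARS '
--                 'ESTATES ESTATE DISTILLERY DISTILLING BREWING BREWERY IMPORTS '
--                 'IMPORT INTERNATIONAL INTL USA US AMERICA AMERICAN GROUP '
--                 'HOLDINGS ENTERPRISES'.split())
--
-- SUFFIXES = ('INC INC. LLC L.L.C. LTD LTD. CORP CORP. CO CO. COMPANY LP L.P. '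
--             'CORPORATION INCORPORATED LIMITED'.split())
--
-- def make_match_key(s: str) -> str:
--     """Create aggressive match key: one character-level scan that strips
--     punctuation, tokenizes and drops stopwords in a single pass."""
--     t = s.upper().strip()
--     for suf in SUFFIXES:
--         if t.endswith(' ' + suf):
--             t = t[:-(len(suf) + 1)].strip()
--     words = []
--     cur = ''
--     for c in t:
--         if c.isalnum():
--             cur += c
--         elif c == ' ':
--             if cur and cur not in STOPWORDS:
--                 words.append(cur)
--             cur = ''
--     if cur and cur not in STOPWORDS:
--         words.append(cur)
--     return ' '.join(words)
-- ===== Notes on version B (the rewrite author's own statement) =====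
-- stated objective: simpler
-- what changed: A pipes the string through repeated split/join passes (normalize_name's filter+split+join, then a 26-iteration stopword loop each re-splitting and re-joining, then a final split+join); B does the suffix stripping once and then a single character-level scan that drops punctuation, tokenizes and filters stopwords (a set) in one pass, joining once at the end.
import Mathlib
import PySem

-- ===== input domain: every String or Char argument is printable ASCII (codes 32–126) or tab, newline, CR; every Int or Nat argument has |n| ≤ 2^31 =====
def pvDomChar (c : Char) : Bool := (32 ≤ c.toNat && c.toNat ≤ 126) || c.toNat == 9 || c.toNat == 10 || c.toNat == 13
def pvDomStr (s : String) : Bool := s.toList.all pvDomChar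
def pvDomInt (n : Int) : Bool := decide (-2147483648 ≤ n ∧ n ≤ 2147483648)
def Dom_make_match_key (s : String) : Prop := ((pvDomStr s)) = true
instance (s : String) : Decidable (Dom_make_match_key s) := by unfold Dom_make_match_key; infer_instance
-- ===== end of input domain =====

-- B replaces A's staged split/join pipeline (26 stopword passes, each re-splitting and
-- re-joining the string) with one character-level scan that tokenizes and filters stopwords
-- in a single pass; objective: simpler.


-- ===== PORT A =====
def pvSuffixes : List (List Char) :=
  [" INC".toList, " INC.".toList, " LLC".toList, " L.L.C.".toList, " LTD".toList, " LTD.".toList,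
   " CORP".toList, " CORP.".toList, " CO".toList, " CO.".toList, " COMPANY".toList, " LP".toList,
   " L.P.".toList, " CORPORATION".toList, " INCORPORATED".toList, " LIMITED".toList]

def normalize_name (cs : List Char) : List Char :=
  if cs.isEmpty then [] else
  let s := PySem.Chars.strip (PySem.Chars.upper cs)
  let s := pvSuffixes.foldl (fun s suffix =>
    if PySem.Chars.endswith s suffix then
      PySem.Chars.strip (PySem.Chars.slice s none (some (-(suffix.length : Int))))
    else s) s
  let s := s.filter (fun c => PySem.Chars.isalnum c || c == ' ')
  PySem.Chars.join [' '] (PySem.Chars.split₀ s)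

def pvWords : List (List Char) :=
  ["THE".toList, "AND".toList, "OF".toList, "WINE".toList, "WINES".toList, "WINERY".toList,
   "VINEYARD".toList, "VINEYARDS".toList, "CELLARS".toList, "ESTATES".toList, "ESTATE".toList,
   "DISTILLERY".toList, "DISTILLING".toList, "BREWING".toList, "BREWERY".toList, "IMPORTS".toList,
   "IMPORT".toList, "INTERNATIONAL".toList, "INTL".toList, "USA".toList, "US".toList,
   "AMERICA".toList, "AMERICAN".toList, "GROUP".toList, "HOLDINGS".toList, "ENTERPRISES".toList]

def make_match_key (s : String) : String :=
  if s.toList.isEmpty then "" else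
  let cs := normalize_name s.toList
  let cs := pvWords.foldl (fun s word =>
    PySem.Chars.join [' '] ((PySem.Chars.split₀ s).filter (fun w => w ≠ word))) cs
  String.ofList (PySem.Chars.join [' '] (PySem.Chars.split₀ cs))

-- ===== PORT B =====
-- B's stopword set, built from one space-separated string (set('… …'.split()))
def pvStopwords : PySem.Set (List Char) :=
  PySem.Set.ofList (PySem.Chars.split₀
    ("THE AND OF WINE WINES WINERY VINEYARD VINEYARDS CELLARS ESTATES ESTATE DISTILLERY DISTILLING BREWING BREWERY IMPORTS IMPORT INTERNATIONAL INTL USA US AMERICA AMERICAN GROUP HOLDINGS ENTERPRISES".toList))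

-- B's suffix words: '… …'.split(); each is tested as ' ' + suf
def pvSufWords : List (List Char) :=
  PySem.Chars.split₀
    ("INC INC. LLC L.L.C. LTD LTD. CORP CORP. CO CO. COMPANY LP L.P. CORPORATION INCORPORATED LIMITED".toList)

-- the single character-level scan: cur = current token, ws = emitted words
def scanGo : List Char → List Char → List (List Char) → List (List Char)
  | [], cur, ws =>
      if !cur.isEmpty && !(PySem.Set.contains pvStopwords cur) then ws ++ [cur] else ws
  | c :: cs, cur, ws =>
      if PySem.Chars.isalnum c then scanGo cs (cur ++ [c]) ws
      else if c == ' ' then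
        scanGo cs []
          (if !cur.isEmpty && !(PySem.Set.contains pvStopwords cur) then ws ++ [cur] else ws)
      else scanGo cs cur ws

def make_match_key_alt (s : String) : String :=
  let t := PySem.Chars.strip (PySem.Chars.upper s.toList)
  let t := pvSufWords.foldl (fun t suf =>
    if PySem.Chars.endswith t (' ' :: suf) then
      PySem.Chars.strip (PySem.Chars.slice t none (some (-((suf.length : Int) + 1))))
    else t) t
  String.ofList (PySem.Chars.join [' '] (scanGo t [] []))

-- ===== PRECONDITION & SPEC =====
def Spec_make_match_key (s : String) (out : String) : Prop := out = make_match_key_alt s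
instance (s : String) (out : String) : Decidable (Spec_make_match_key s out) := by unfold Spec_make_match_key; infer_instance

-- ===== CLAIM (what is proved, stated in full; the proofs are below) =====
def Claim_equal_make_match_key : Prop := ∀ (s : String), Dom_make_match_key s → Spec_make_match_key s (make_match_key s)

-- ===== LEMMAS AND PROOFS =====

theorem alnum_not_space (c : Char) (h : PySem.Chars.isalnum c = true) :
    PySem.Chars.isspace c = false := by
  unfold PySem.Chars.isalnum PySem.Chars.isspace PySem.Chars.isalpha PySem.Chars.isdigit
    PySem.Chars.isupper PySem.Chars.islower at *
  revert h
  simp only [Char.le_def, UInt32.le_iff_toNat_le, Char.toNat, Bool.or_eq_true, Bool.and_eq_true,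
    decide_eq_true_eq, Bool.or_eq_false_iff, Bool.and_eq_false_iff, decide_eq_false_iff_not,
    show 'A'.val.toNat = 65 from rfl, show 'Z'.val.toNat = 90 from rfl,
    show 'a'.val.toNat = 97 from rfl, show 'z'.val.toNat = 122 from rfl,
    show '0'.val.toNat = 48 from rfl, show '9'.val.toNat = 57 from rfl]
  intro h
  omega

-- a token is "good" if it is nonempty and contains no whitespace character
def GoodTok (t : List Char) : Prop := t ≠ [] ∧ ∀ c ∈ t, PySem.Chars.isspace c = false

theorem split₀_go_nil (cur : List Char) (acc : List (List Char)) :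
    PySem.Chars.split₀.go [] cur acc =
      if cur.isEmpty then acc.reverse else (cur.reverse :: acc).reverse := by
  simp [PySem.Chars.split₀.go]

theorem split₀_go_cons (c : Char) (rest cur : List Char) (acc : List (List Char)) :
    PySem.Chars.split₀.go (c :: rest) cur acc =
      if PySem.Chars.isspace c then
        (if cur.isEmpty then PySem.Chars.split₀.go rest [] acc
         else PySem.Chars.split₀.go rest [] (cur.reverse :: acc))
      else PySem.Chars.split₀.go rest (c :: cur) acc := by
  rw [PySem.Chars.split₀.go]

theorem split₀_go_word (w rest cur : List Char) (acc : List (List Char))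
    (h : ∀ c ∈ w, PySem.Chars.isspace c = false) :
    PySem.Chars.split₀.go (w ++ rest) cur acc =
      PySem.Chars.split₀.go rest (w.reverse ++ cur) acc := by
  induction w generalizing cur with
  | nil => simp
  | cons c w ih =>
    rw [List.cons_append, split₀_go_cons, h c (by simp)]
    simp only [Bool.false_eq_true, if_false]
    rw [ih _ (fun c hc => h c (by simp [hc]))]
    simp

theorem split₀_go_good (s cur : List Char) (acc : List (List Char))
    (hcur : ∀ c ∈ cur, PySem.Chars.isspace c = false)
    (hacc : ∀ t ∈ acc, GoodTok t) :
    ∀ t ∈ PySem.Chars.split₀.go s cur acc, GoodTok t := by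
  induction s generalizing cur acc with
  | nil =>
    rw [split₀_go_nil]
    split
    · intro t ht; exact hacc t (by simpa using ht)
    · rename_i hne
      intro t ht
      rcases (by simpa using ht) with h1 | h1
      · exact hacc t h1
      · subst h1
        refine ⟨by simpa [List.isEmpty_iff] using hne, ?_⟩
        intro c hc; exact hcur c (by simpa using hc)
  | cons c s ih =>
    rw [split₀_go_cons]
    by_cases hc : PySem.Chars.isspace c = true
    · rw [if_pos hc]
      split
      · exact ih [] acc (by simp) hacc
      · rename_i hne
        refine ih [] _ (by simp) ?_
        intro t ht
        rcases (by simpa using ht) with h1 | h1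
        · subst h1
          refine ⟨by simpa [List.isEmpty_iff] using hne, ?_⟩
          intro d hd; exact hcur d (by simpa using hd)
        · exact hacc t h1
    · rw [if_neg hc]
      refine ih (c :: cur) acc ?_ hacc
      intro d hd
      rcases (by simpa using hd) with h1 | h1
      · subst h1; simpa using hc
      · exact hcur d h1

-- every token produced by split₀ is good
theorem split₀_good (cs : List Char) : ∀ t ∈ PySem.Chars.split₀ cs, GoodTok t := by
  exact split₀_go_good cs [] [] (by simp) (by simp)

theorem split₀_go_join (ts : List (List Char)) (acc : List (List Char))
    (h : ∀ t ∈ ts, GoodTok t) :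
    PySem.Chars.split₀.go (PySem.Chars.join [' '] ts) [] acc = acc.reverse ++ ts := by
  induction ts generalizing acc with
  | nil => rw [PySem.Chars.join_nil, split₀_go_nil]; simp
  | cons w ts ih =>
    obtain ⟨hw, hwc⟩ := h w (by simp)
    cases ts with
    | nil =>
      rw [PySem.Chars.join_singleton, ← List.append_nil w, split₀_go_word w [] [] acc hwc,
        split₀_go_nil]
      simp [List.isEmpty_iff, hw]
    | cons w2 ts' =>
      rw [PySem.Chars.join_cons_cons, List.append_assoc, split₀_go_word w _ [] acc hwc]
      have hsp : PySem.Chars.isspace ' ' = true := by decide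
      simp only [List.append_nil, List.cons_append, List.nil_append]
      rw [split₀_go_cons, if_pos hsp, if_neg (by simpa [List.isEmpty_iff] using hw)]
      simp only [List.reverse_reverse]
      rw [ih _ (fun t ht => h t (by simp [ht]))]
      simp

-- splitting the space-join of good tokens gives the tokens back
theorem split₀_join (ts : List (List Char)) (h : ∀ t ∈ ts, GoodTok t) :
    PySem.Chars.split₀ (PySem.Chars.join [' '] ts) = ts := by
  unfold PySem.Chars.split₀
  rw [split₀_go_join ts [] h]; simp

-- A's word-removal loop collapses to one filter
theorem loop_eq (L : List (List Char)) (ts : List (List Char)) (h : ∀ t ∈ ts, GoodTok t) :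
    L.foldl (fun s word =>
      PySem.Chars.join [' '] ((PySem.Chars.split₀ s).filter (fun w => w ≠ word)))
      (PySem.Chars.join [' '] ts)
    = PySem.Chars.join [' '] (ts.filter (fun t => decide (t ∉ L))) := by
  induction L generalizing ts with
  | nil => simp
  | cons w L ih =>
    rw [List.foldl_cons, split₀_join ts h]
    have hgood : ∀ t ∈ ts.filter (fun x => x ≠ w), GoodTok t := by
      intro t ht; exact h t (List.mem_of_mem_filter ht)
    rw [ih _ hgood, List.filter_filter]
    congr 1
    apply List.filter_congr
    intro t _
    by_cases h1 : t = w <;> by_cases h2 : t ∈ L <;> simp [h1, h2]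

-- membership in B's stopword set is membership in A's word list
set_option maxRecDepth 4000 in
theorem stop_list : pvStopwords = pvWords := by
  unfold pvStopwords
  have hl : PySem.Chars.split₀
      ("THE AND OF WINE WINES WINERY VINEYARD VINEYARDS CELLARS ESTATES ESTATE DISTILLERY DISTILLING BREWING BREWERY IMPORTS IMPORT INTERNATIONAL INTL USA US AMERICA AMERICAN GROUP HOLDINGS ENTERPRISES".toList)
      = pvWords := by decide
  rw [hl]
  apply PySem.Set.ofList_eq_self_of_nodup
  decide

-- flushing the current token = filtering its singleton
theorem flush_eq (cur : List Char) (ws : List (List Char)) :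
    (if !cur.isEmpty && !(PySem.Set.contains pvStopwords cur) then ws ++ [cur] else ws)
    = ws ++ ((if cur.isEmpty then [] else [cur]).filter
        (fun w => !(PySem.Set.contains pvStopwords w))) := by
  by_cases hc : cur.isEmpty <;> by_cases hs : cur ∈ pvStopwords <;>
    simp [hc, hs, PySem.Set.contains]

-- accumulator lemma for split₀.go
theorem split₀_go_acc (s cur : List Char) (acc : List (List Char)) :
    PySem.Chars.split₀.go s cur acc = acc.reverse ++ PySem.Chars.split₀.go s cur [] := by
  induction s generalizing cur acc with
  | nil =>
    rw [split₀_go_nil, split₀_go_nil]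
    split <;> simp
  | cons c s ih =>
    rw [split₀_go_cons, split₀_go_cons]
    split
    · split
      · rw [ih [] acc]
      · rw [ih [] (cur.reverse :: acc), ih [] [cur.reverse]]; simp
    · rw [ih (c :: cur) acc]

-- split₀ of a nonempty whitespace-free word is that word
theorem split₀_word (w : List Char) (hne : w ≠ [])
    (h : ∀ c ∈ w, PySem.Chars.isspace c = false) :
    PySem.Chars.split₀ w = [w] := by
  unfold PySem.Chars.split₀
  rw [← List.append_nil w, split₀_go_word w [] [] [] h, split₀_go_nil]
  simp [List.isEmpty_iff, hne]

-- split₀ distributes over a word, a space, and the rest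
theorem split₀_word_space (cur rest : List Char)
    (h : ∀ c ∈ cur, PySem.Chars.isspace c = false) :
    PySem.Chars.split₀ (cur ++ ' ' :: rest) =
      (if cur.isEmpty then [] else [cur]) ++ PySem.Chars.split₀ rest := by
  unfold PySem.Chars.split₀
  rw [split₀_go_word cur _ [] [] h, split₀_go_cons, if_pos (by decide)]
  simp only [List.append_nil]
  by_cases hc : cur = []
  · simp [hc]
  · rw [if_neg (by simpa [List.isEmpty_iff]), if_neg (by simpa [List.isEmpty_iff]),
      split₀_go_acc rest [] [cur.reverse.reverse]]
    simp

-- B's scanner equals filter-of-split of the punctuation-filtered string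
theorem scan_inv (cs cur : List Char) (ws : List (List Char))
    (hcur : ∀ c ∈ cur, PySem.Chars.isalnum c = true) :
    scanGo cs cur ws =
      ws ++ (PySem.Chars.split₀
          (cur ++ cs.filter (fun c => PySem.Chars.isalnum c || c == ' '))).filter
        (fun w => !(PySem.Set.contains pvStopwords w)) := by
  induction cs generalizing cur ws with
  | nil =>
    have hcsp : ∀ c ∈ cur, PySem.Chars.isspace c = false :=
      fun c hc => alnum_not_space c (hcur c hc)
    rw [scanGo, flush_eq]
    simp only [List.filter_nil, List.append_nil]
    by_cases hc : cur = []
    · simp [hc, PySem.Chars.split₀, split₀_go_nil]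
    · rw [split₀_word cur hc hcsp]
      simp [List.isEmpty_iff, hc]
  | cons c cs ih =>
    rw [scanGo]
    by_cases ha : PySem.Chars.isalnum c = true
    · rw [if_pos ha]
      have hcur' : ∀ d ∈ cur ++ [c], PySem.Chars.isalnum d = true := by
        intro d hd
        rcases List.mem_append.mp hd with h1 | h1
        · exact hcur d h1
        · simp only [List.mem_singleton] at h1; subst h1; exact ha
      rw [ih (cur ++ [c]) ws hcur']
      simp [ha, List.append_assoc]
    · rw [if_neg ha]
      by_cases hsp : c = ' '
      · subst hsp
        have hcsp : ∀ c ∈ cur, PySem.Chars.isspace c = false :=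
          fun c hc => alnum_not_space c (hcur c hc)
        rw [if_pos (by decide : ((' ' == ' ') = true)), flush_eq]
        rw [ih [] _ (by simp)]
        rw [List.filter_cons_of_pos (by simp)]
        rw [split₀_word_space cur _ hcsp, List.filter_append]
        simp [List.append_assoc]
      · rw [if_neg (by simpa using hsp)]
        rw [ih cur ws hcur]
        rw [List.filter_cons_of_neg (by simp [ha, hsp])]

-- B's suffix-stripping fold equals A's
theorem suffix_fold_eq (t : List Char) :
    pvSufWords.foldl (fun t suf =>
      if PySem.Chars.endswith t (' ' :: suf) then
        PySem.Chars.strip (PySem.Chars.slice t none (some (-((suf.length : Int) + 1))))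
      else t) t
    = pvSuffixes.foldl (fun s suffix =>
        if PySem.Chars.endswith s suffix then
          PySem.Chars.strip (PySem.Chars.slice s none (some (-(suffix.length : Int))))
        else s) t := by
  have h : pvSuffixes = pvSufWords.map (fun suf => ' ' :: suf) := by
    unfold pvSufWords
    decide
  rw [h, List.foldl_map]
  congr 1

-- the common core: A's join/split pipeline over t equals B's single scan of t
theorem core (t : List Char) :
    PySem.Chars.join [' '] (PySem.Chars.split₀
      (pvWords.foldl (fun s word =>
        PySem.Chars.join [' '] ((PySem.Chars.split₀ s).filter (fun w => w ≠ word)))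
        (PySem.Chars.join [' '] (PySem.Chars.split₀
          (t.filter (fun c => PySem.Chars.isalnum c || c == ' '))))))
    = PySem.Chars.join [' '] (scanGo t [] []) := by
  set ts := PySem.Chars.split₀ (t.filter (fun c => PySem.Chars.isalnum c || c == ' ')) with hts
  have hgts : ∀ u ∈ ts, GoodTok u := split₀_good _
  rw [loop_eq pvWords ts hgts]
  have hgf : ∀ u ∈ ts.filter (fun u => decide (u ∉ pvWords)), GoodTok u :=
    fun u hu => hgts u (List.mem_of_mem_filter hu)
  rw [split₀_join _ hgf, scan_inv t [] [] (by simp)]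
  simp only [List.nil_append]
  refine congrArg (PySem.Chars.join [' ']) (List.filter_congr ?_)
  intro u _
  rw [stop_list]
  by_cases h : u ∈ pvWords <;> simp [h, PySem.Set.contains]

-- B's suffix loop keeps the empty string empty
theorem fold_nil (l : List (List Char)) :
    l.foldl (fun t suf =>
      if PySem.Chars.endswith t (' ' :: suf) then
        PySem.Chars.strip (PySem.Chars.slice t none (some (-((suf.length : Int) + 1))))
      else t) [] = [] := by
  induction l with
  | nil => rfl
  | cons a l ih =>
    rw [List.foldl_cons]
    have hf : PySem.Chars.endswith [] (' ' :: a) = false := by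
      rw [Bool.eq_false_iff]
      intro hcon
      have := (PySem.Chars.endswith_iff _ _).mp hcon
      simp at this
    simp only [hf, Bool.false_eq_true, if_false]
    exact ih

-- ===== VERDICT (by name: the statement is the Claim_ definition above) =====
set_option maxHeartbeats 1000000 in
set_option maxRecDepth 20000 in
theorem make_match_key_spec : Claim_equal_make_match_key := by
  intro s _
  unfold Spec_make_match_key make_match_key make_match_key_alt
  by_cases he : s.toList.isEmpty
  · rw [if_pos he]
    rw [List.isEmpty_iff] at he
    rw [he]
    simp only [show PySem.Chars.strip (PySem.Chars.upper ([] : List Char)) = [] from by decide,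
      fold_nil]
    rfl
  · rw [if_neg he]
    simp only [normalize_name, he, Bool.false_eq_true, if_false, suffix_fold_eq]
    exact congrArg String.ofList (core _)
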